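-- pv_equiv track=rewrite | github.com/kaizhao1123/MyTwoCameraImage | volume.py | findNextUpper
-- ===== SOURCE A (Python) =====
-- def suitForSlicing(list, midPoint):
--     hasUpper = False
--     hasLower = False
--     for ele in list:
--         if ele < midPoint:
--             hasUpper = True
--         else:
--             hasLower = True
--     if hasUpper is True and hasLower is True:
--         return True
--     else:
--         return False
--
-- def findNextUpper(dict, index, mid):
--
--     while index <= list(dict)[-1]:
--         if index in dict:
--             vList = dict.get(index)
--             if suitForSlicing(vList, mid):
--                 if vList[0] < vList[-1]:
--                     return index, vList[0]
--                 else: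
--                     return index, vList[-1]
--             else:
--                 if vList[0] <= mid:
--                     return index, vList[0]
--                 else:
--                     index += 1
--         else:
--             index += 1
--     return -1, -1
-- ===== SOURCE B (Python) =====
-- def findNextUpper(dict, index, mid):
--     last = list(dict)[-1]
--     for k in sorted(dict):
--         if index <= k <= last:
--             v = dict[k]
--             if any(e < mid for e in v) and any(e >= mid for e in v):
--                 return k, min(v[0], v[-1])
--             if v[0] <= mid:
--                 return k, v[0]
--     return -1, -1
-- ===== Notes on version B (the rewrite author's own statement) =====
-- stated objective: alternative
-- what changed: Instead of counting index upward one integer at a time, rebuilding list(dict) on every while-iteration and probing membership per integer, B computes the last key once, sorts the keys once and scans only the present keys in [index, last] in increasing order with the same early exit.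
import Mathlib
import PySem

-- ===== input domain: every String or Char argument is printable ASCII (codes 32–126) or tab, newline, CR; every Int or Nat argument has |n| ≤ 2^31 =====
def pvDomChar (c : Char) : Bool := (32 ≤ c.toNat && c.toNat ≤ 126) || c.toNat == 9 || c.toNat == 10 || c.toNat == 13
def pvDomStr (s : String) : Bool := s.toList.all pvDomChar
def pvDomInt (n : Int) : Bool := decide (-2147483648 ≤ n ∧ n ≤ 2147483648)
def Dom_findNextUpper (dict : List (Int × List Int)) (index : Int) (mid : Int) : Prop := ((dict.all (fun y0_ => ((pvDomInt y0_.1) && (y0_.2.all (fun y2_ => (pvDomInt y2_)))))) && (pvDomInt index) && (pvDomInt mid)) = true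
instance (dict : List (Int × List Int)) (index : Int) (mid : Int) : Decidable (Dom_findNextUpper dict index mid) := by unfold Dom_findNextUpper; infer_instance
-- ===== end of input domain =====

-- B computes the last key once, sorts the keys once and scans only the present keys in
-- [index, last] in ascending order with the same early exit, instead of A's counting every
-- integer from index upward with a list(dict) rebuild and membership probe per step.


-- ===== PORT A =====
-- suitForSlicing: flag-accumulating loop, transliterated as a foldl over the pair of flags
def suitForSlicing (list : List Int) (midPoint : Int) : Bool :=
  let flags := list.foldl
    (fun (p : Bool × Bool) ele => if ele < midPoint then (true, p.2) else (p.1, true))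
    (false, false)
  if flags.1 = true && flags.2 = true then true else false

-- the while loop; fuel = number of remaining candidate indices (index counts up to last key)
def findNextUpperGo (dict : List (Int × List Int)) (mid : Int) (index : Int) : Nat → Int × Int
  | 0 => (-1, -1)
  | fuel + 1 =>
    -- while index <= list(dict)[-1]  (list(dict)[-1]: last key; IndexError on empty dict → Pre_)
    if index ≤ PySem.List.pyGetD (dict.map Prod.fst) (-1) 0 then
      match dict.find? (fun p => p.1 == index) with   -- 'index in dict' + 'dict.get(index)'
      | some kv =>
        let vList := kv.2
        if suitForSlicing vList mid then
          if PySem.List.pyGetD vList 0 0 < PySem.List.pyGetD vList (-1) 0 then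
            (index, PySem.List.pyGetD vList 0 0)
          else
            (index, PySem.List.pyGetD vList (-1) 0)
        else
          if PySem.List.pyGetD vList 0 0 ≤ mid then (index, PySem.List.pyGetD vList 0 0)
          else findNextUpperGo dict mid (index + 1) fuel
      | none => findNextUpperGo dict mid (index + 1) fuel
    else (-1, -1)

def findNextUpper (dict : List (Int × List Int)) (index : Int) (mid : Int) : Int × Int :=
  findNextUpperGo dict mid index
    (PySem.List.pyGetD (dict.map Prod.fst) (-1) 0 + 1 - index).toNat

-- ===== PORT B =====
-- Source B's loop 'for k in sorted(dict): if index <= k <= last: …' — structural recursion over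
-- the sorted key list; dict[k] is first-match lookup (exact: Pre_ requires unique keys)
def altScan (dict : List (Int × List Int)) (index last mid : Int) : List Int → Int × Int
  | [] => (-1, -1)
  | k :: rest =>
    if decide (index ≤ k) && decide (k ≤ last) then
      let v := ((dict.find? (fun q => q.1 == k)).map Prod.snd).getD []
      if v.any (fun e => e < mid) && v.any (fun e => mid ≤ e) then
        (k, min (PySem.List.pyGetD v 0 0) (PySem.List.pyGetD v (-1) 0))
      else if PySem.List.pyGetD v 0 0 ≤ mid then (k, PySem.List.pyGetD v 0 0)
      else altScan dict index last mid rest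
    else altScan dict index last mid rest

def findNextUpper_alt (dict : List (Int × List Int)) (index : Int) (mid : Int) : Int × Int :=
  -- last = list(dict)[-1] (IndexError on empty dict → Pre_)
  let last := PySem.List.pyGetD (dict.map Prod.fst) (-1) 0
  altScan dict index last mid (PySem.List.sorted (dict.map Prod.fst) (fun x => x) false)

-- ===== PRECONDITION & SPEC =====
-- the acceptance test of the scan (used by Pre_ to name where the scan returns)
def acceptsV (mid : Int) (v : List Int) : Bool :=
  (v.any (fun e => e < mid) && v.any (fun e => mid ≤ e))
    || decide (PySem.List.pyGetD v 0 0 ≤ mid)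

-- Pre_ excludes exactly the inputs where A raises IndexError — the empty dict (list(dict)[-1])
-- and dicts where the upward scan reaches an empty value list before returning (vList[0]),
-- i.e. an in-range empty-valued entry not preceded in key order by an accepted nonempty one —
-- plus assoc lists with duplicate keys, impossible for a real Python dict, where first-match
-- lookup vs Python's last-wins overwrite makes either reading defensible.
def Pre_findNextUpper (dict : List (Int × List Int)) (index : Int) (mid : Int) : Prop :=
  dict ≠ [] ∧ (dict.map Prod.fst).Nodup ∧
    ∀ p ∈ dict, index ≤ p.1 → p.1 ≤ PySem.List.pyGetD (dict.map Prod.fst) (-1) 0 → p.2 = [] →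
      ∃ q ∈ dict, index ≤ q.1 ∧ q.1 < p.1 ∧ q.2 ≠ [] ∧ acceptsV mid q.2 = true
instance (dict : List (Int × List Int)) (index : Int) (mid : Int) : Decidable (Pre_findNextUpper dict index mid) := by unfold Pre_findNextUpper; infer_instance
def pvWitness_findNextUpper : (List (Int × List Int)) × Int × Int := ([(1, [2, 3]), (3, [1])], 1, 2)

def Spec_findNextUpper (dict : List (Int × List Int)) (index : Int) (mid : Int) (out : Int × Int) : Prop := out = findNextUpper_alt dict index mid
instance (dict : List (Int × List Int)) (index : Int) (mid : Int) (out : Int × Int) : Decidable (Spec_findNextUpper dict index mid out) := by unfold Spec_findNextUpper; infer_instance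

-- ===== CLAIM (what is proved, stated in full; the proofs are below) =====
def Claim_equal_findNextUpper : Prop := ∀ (dict : List (Int × List Int)) (index : Int) (mid : Int), Dom_findNextUpper dict index mid → Pre_findNextUpper dict index mid → Spec_findNextUpper dict index mid (findNextUpper dict index mid)

-- ===== LEMMAS AND PROOFS =====

-- proof-side abbreviation: first-match value lookup
def lookupV (dict : List (Int × List Int)) (k : Int) : List Int :=
  ((dict.find? (fun q => q.1 == k)).map Prod.snd).getD []

-- the common scan over an explicit key list (the bridge between the two ports)
def scanKeys (dict : List (Int × List Int)) (mid : Int) : List Int → Int × Int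
  | [] => (-1, -1)
  | k :: rest =>
    let v := lookupV dict k
    if v.any (fun e => e < mid) && v.any (fun e => mid ≤ e) then
      (k, min (PySem.List.pyGetD v 0 0) (PySem.List.pyGetD v (-1) 0))
    else
      if PySem.List.pyGetD v 0 0 ≤ mid then (k, PySem.List.pyGetD v 0 0)
      else scanKeys dict mid rest

-- suitForSlicing is 'some element < mid and some element >= mid'
theorem suit_eq_any (v : List Int) (mid : Int) :
    suitForSlicing v mid = (v.any (fun e => e < mid) && v.any (fun e => mid ≤ e)) := by
  unfold suitForSlicing
  suffices h : ∀ (a b : Bool),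
      v.foldl (fun (p : Bool × Bool) ele => if ele < mid then (true, p.2) else (p.1, true)) (a, b)
        = (a || v.any (fun e => e < mid), b || v.any (fun e => mid ≤ e)) by
    simp [h false false, List.any_eq]
  induction v with
  | nil => simp
  | cons x xs ih =>
    intro a b
    by_cases hx : x < mid
    · simp [List.foldl_cons, hx, ih, not_le.mpr hx]
    · simp [List.foldl_cons, hx, ih, not_lt.mp hx]

-- the two interval predicates agree away from index
theorem interval_pred_eq (index last : Int) :
    ∀ k : Int, k ≠ index →
      ((decide (index ≤ k) && decide (k ≤ last)) = (decide (index + 1 ≤ k) && decide (k ≤ last))) := by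
  intro k hk
  by_cases h1 : index ≤ k
  · by_cases h2 : index + 1 ≤ k
    · simp [h1, h2]
    · exact absurd (by omega : k = index) hk
  · simp [h1, show ¬ index + 1 ≤ k by omega]

-- filtering [index, last] out of a nodup list containing index peels off exactly index
theorem filter_interval_perm (index last : Int) (hle : index ≤ last) :
    ∀ (keys : List Int), keys.Nodup → index ∈ keys →
      (keys.filter (fun k => decide (index ≤ k) && decide (k ≤ last))).Perm
        (index :: keys.filter (fun k => decide (index + 1 ≤ k) && decide (k ≤ last))) := by
  intro keys
  induction keys with
  | nil => intro _ h; exact absurd h (List.not_mem_nil)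
  | cons a as ih =>
    intro hnd hmem
    have hnd' : as.Nodup := (List.nodup_cons.mp hnd).2
    by_cases ha : a = index
    · subst ha
      have hnotin : a ∉ as := (List.nodup_cons.mp hnd).1
      rw [List.filter_cons, if_pos (by simp [hle]), List.filter_cons, if_neg (by simp)]
      have heq : as.filter (fun k => decide (a ≤ k) && decide (k ≤ last))
          = as.filter (fun k => decide (a + 1 ≤ k) && decide (k ≤ last)) := by
        apply List.filter_congr
        intro k hk
        exact interval_pred_eq a last k (fun h => hnotin (h ▸ hk))
      rw [heq]
    · have hmem' : index ∈ as := by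
        rcases List.mem_cons.mp hmem with h | h
        · exact absurd h.symm ha
        · exact h
      have hpp := interval_pred_eq index last a ha
      by_cases hpa : (decide (index ≤ a) && decide (a ≤ last)) = true
      · rw [List.filter_cons, if_pos hpa, List.filter_cons, if_pos (hpp ▸ hpa)]
        exact ((ih hnd' hmem').cons a).trans (List.Perm.swap index a _)
      · rw [List.filter_cons, if_neg hpa, List.filter_cons, if_neg (hpp ▸ hpa)]
        exact ih hnd' hmem'

-- the sorted candidate list peels off 'index' when index is a present key
theorem cands_cons (keys : List Int) (last index : Int)
    (hnd : keys.Nodup) (hmem : index ∈ keys) (hle : index ≤ last) :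
    PySem.List.sorted (keys.filter (fun k => index ≤ k && k ≤ last)) (fun x => x) false
      = index :: PySem.List.sorted (keys.filter (fun k => index + 1 ≤ k && k ≤ last)) (fun x => x) false := by
  apply PySem.List.sorted_eq_of_perm_of_pairwise_lt
  · exact ((PySem.List.sorted_perm _ _ _).cons index).trans
      (filter_interval_perm index last hle keys hnd hmem).symm
  · constructor
    · intro y hy
      have hy' := (PySem.List.mem_sorted _ _ _ _).mp hy
      have := List.of_mem_filter hy'
      simp at this; omega
    · have hps := PySem.List.sorted_pairwise
        (keys.filter (fun k => decide (index + 1 ≤ k) && decide (k ≤ last))) (fun x : Int => x)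
      have hnds : (PySem.List.sorted (keys.filter (fun k => decide (index + 1 ≤ k) && decide (k ≤ last))) (fun x : Int => x) false).Nodup :=
        (PySem.List.sorted_perm _ _ _).nodup_iff.mpr (hnd.filter _)
      exact (hps.and hnds).imp (fun h => lt_of_le_of_ne h.1 h.2)

-- when index is absent the candidate list is unchanged
theorem cands_skip (keys : List Int) (last index : Int) (hmem : index ∉ keys) :
    keys.filter (fun k => index ≤ k && k ≤ last)
      = keys.filter (fun k => index + 1 ≤ k && k ≤ last) := by
  apply List.filter_congr
  intro k hk
  exact interval_pred_eq index last k (fun h => hmem (h ▸ hk))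

-- A's counting loop equals the scan of the sorted candidate keys
theorem go_eq_scan (dict : List (Int × List Int)) (mid : Int)
    (hnd : (dict.map Prod.fst).Nodup) :
    ∀ (fuel : Nat) (index : Int),
      (PySem.List.pyGetD (dict.map Prod.fst) (-1) 0 + 1 - index).toNat ≤ fuel →
      findNextUpperGo dict mid index fuel
        = scanKeys dict mid
            (PySem.List.sorted
              ((dict.map Prod.fst).filter
                (fun k => index ≤ k && k ≤ PySem.List.pyGetD (dict.map Prod.fst) (-1) 0))
              (fun x => x) false) := by
  intro fuel
  set last := PySem.List.pyGetD (dict.map Prod.fst) (-1) 0 with hlast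
  induction fuel with
  | zero =>
    intro index hf
    have hempty : (dict.map Prod.fst).filter (fun k => index ≤ k && k ≤ last) = [] := by
      apply List.filter_eq_nil_iff.mpr
      intro k _; simp; omega
    rw [hempty]
    rfl
  | succ fuel ih =>
    intro index hf
    by_cases hle : index ≤ last
    · rw [findNextUpperGo, if_pos hle]
      by_cases hmem : index ∈ dict.map Prod.fst
      · obtain ⟨q, hq, hqf⟩ := List.mem_map.mp hmem
        have hsome : (dict.find? (fun p => p.1 == index)).isSome :=
          List.find?_isSome.mpr ⟨q, hq, by simp [hqf]⟩
        obtain ⟨kv, hfind⟩ := Option.isSome_iff_exists.mp hsome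
        rw [hfind]
        rw [cands_cons (dict.map Prod.fst) last index hnd hmem hle]
        rw [scanKeys]
        have hlook : lookupV dict index = kv.2 := by
          simp [lookupV, hfind]
        simp only [hlook]
        rw [suit_eq_any]
        by_cases hsuit : (kv.2.any (fun e => e < mid) && kv.2.any (fun e => mid ≤ e)) = true
        · rw [if_pos hsuit, if_pos hsuit]
          split_ifs with h
          · rw [min_eq_left (le_of_lt h)]
          · rw [min_eq_right (by omega)]
        · rw [if_neg hsuit, if_neg hsuit]
          by_cases hv0 : PySem.List.pyGetD kv.2 0 0 ≤ mid
          · rw [if_pos hv0, if_pos hv0]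
          · rw [if_neg hv0, if_neg hv0]
            exact ih (index + 1) (by omega)
      · rw [List.find?_eq_none.mpr
          (by intro p hp hb; exact hmem (List.mem_map.mpr ⟨p, hp, by simpa using hb⟩))]
        rw [cands_skip (dict.map Prod.fst) last index hmem]
        exact ih (index + 1) (by omega)
    · rw [findNextUpperGo, if_neg hle]
      have hempty : (dict.map Prod.fst).filter (fun k => index ≤ k && k ≤ last) = [] := by
        apply List.filter_eq_nil_iff.mpr
        intro k _; simp; omega
      rw [hempty]
      rfl

-- B's guarded scan over a key list is the unguarded scan of its in-range sublist
theorem altScan_eq_scan (dict : List (Int × List Int)) (index last mid : Int) :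
    ∀ L : List Int,
      altScan dict index last mid L
        = scanKeys dict mid (L.filter (fun k => decide (index ≤ k) && decide (k ≤ last))) := by
  intro L
  induction L with
  | nil => rfl
  | cons k rest ih =>
    rw [altScan, List.filter_cons]
    by_cases hin : (decide (index ≤ k) && decide (k ≤ last)) = true
    · rw [if_pos hin, if_pos hin, scanKeys]
      simp only [lookupV, ih]
    · rw [if_neg hin, if_neg hin, ih]

-- filtering commutes with sorting on a nodup key list
theorem sorted_filter (keys : List Int) (p : Int → Bool) (hnd : keys.Nodup) :
    PySem.List.sorted (keys.filter p) (fun x => x) false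
      = (PySem.List.sorted keys (fun x => x) false).filter p := by
  apply PySem.List.sorted_eq_of_perm_of_pairwise_lt
  · exact ((PySem.List.sorted_perm keys (fun x : Int => x) false).filter p)
  · have hps := PySem.List.sorted_pairwise keys (fun x : Int => x)
    have hnds : (PySem.List.sorted keys (fun x : Int => x) false).Nodup :=
      (PySem.List.sorted_perm _ _ _).nodup_iff.mpr hnd
    exact ((hps.and hnds).imp (fun h => lt_of_le_of_ne h.1 h.2)).filter p

-- ===== VERDICT (by name: the statement is the Claim_ definition above) =====
theorem findNextUpper_spec : Claim_equal_findNextUpper := by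
  intro dict index mid _ hpre
  obtain ⟨-, hnd, -⟩ := hpre
  unfold Spec_findNextUpper
  unfold findNextUpper findNextUpper_alt
  rw [go_eq_scan dict mid hnd _ index (le_refl _),
    sorted_filter (dict.map Prod.fst) _ hnd,
    ← altScan_eq_scan]
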